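-- pv_equiv track=rewrite | github.com/Weiqifan1/chinesetextminingpy | src/libraryInterface/CedictParser.py | cedictDictionariesFromRawFileContent
-- ===== SOURCE A (Python) =====
-- import itertools
--
-- def cedictListToDict(x):
--     dict = {
--             "traditional": x[0],
--             "simplified": x[1],
--             "pinyin": x[2],
--             "meaning": x[3]}
--     return dict
--
-- def getCedictSublistsToDict(group):
--     nestedList = list(group)
--     res = [cedictListToDict(x) for x in nestedList]
--     return res
--
-- def cedictDictionariesFromRawFileContent(rawDictionaryContent):
--     filelines = rawDictionaryContent.split('\n')
--     withoutComments = removeCommentLinesFromCedict(filelines)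
--     resultObj = map(lineToList, withoutComments)
--     res = list(resultObj)
--
--     listOfTrad = [x[0] for x in res]
--     tradset = set(listOfTrad)
--     listOfSimp = [x[1] for x in res]
--     simpset = set(listOfSimp)
--
--     sortByFirst = sorted(res)
--     sortBySEcond = sorted(res, key = lambda x: x[1])
--
--     tradIter = itertools.groupby(sortByFirst, lambda x: x[0])
--     tradDictList = [{key : getCedictSublistsToDict(group)} for key,group in tradIter]
--     tradSuperDict = {}
--     for d in tradDictList:
--         tradSuperDict.update(d)
--
--     simpIter = itertools.groupby(sortBySEcond, lambda x: x[1])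
--     simpDictList = [{key : getCedictSublistsToDict(group)} for key,group in simpIter]
--     simpSuperDict = {}
--     for d in simpDictList:
--         simpSuperDict.update(d)
--     return {"traditionalDict": tradSuperDict,
--             "simplifiedDict": simpSuperDict}
--
-- def removeCommentLinesFromCedict(filelines):
--     noComments = [x for x in filelines if not (x.startswith("# ") or x.startswith("#!"))]
--     return noComments
--
-- def createDisplayPinyinString(rawPinyin):
--     pinyinList = rawPinyin.split()
--     capitalize = [(x[0].upper() + x[1:]) for x in pinyinList]
--     return "".join(capitalize)
--
-- def lineToList(stringLine):
--     firstSplit = stringLine.split(" ", 1)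
--     secondSplit = firstSplit[1].split("[", 1)
--     thirdSplit = secondSplit[1].split("]", 1)
--     traditional = firstSplit[0]
--     simplified = secondSplit[0].strip()
--     rawPinyin = thirdSplit[0]
--     meaning = thirdSplit[1].strip()
--     betterPinyin = createDisplayPinyinString(rawPinyin)
--     return [traditional,
--             simplified,
--             betterPinyin,
--             meaning]
-- ===== SOURCE B (Python) =====
-- def cedictListToDict(x):
--     return {"traditional": x[0],
--             "simplified": x[1],
--             "pinyin": x[2],
--             "meaning": x[3]}
--
-- def createDisplayPinyinString(rawPinyin):
--     return "".join(x[0].upper() + x[1:] for x in rawPinyin.split())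
--
-- def lineToList(stringLine):
--     firstSplit = stringLine.split(" ", 1)
--     secondSplit = firstSplit[1].split("[", 1)
--     thirdSplit = secondSplit[1].split("]", 1)
--     return [firstSplit[0],
--             secondSplit[0].strip(),
--             createDisplayPinyinString(thirdSplit[0]),
--             thirdSplit[1].strip()]
--
-- def cedictDictionariesFromRawFileContent(rawDictionaryContent):
--     rows = [lineToList(line)
--             for line in rawDictionaryContent.split('\n')
--             if not (line.startswith("# ") or line.startswith("#!"))]
--
--     # Bucket the rows by both keys in ONE pass over the unsorted rows
--     # (no global sort, no groupby).
--     tradBuckets = {}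
--     simpBuckets = {}
--     for row in rows:
--         tradBuckets.setdefault(row[0], []).append(row)
--         simpBuckets.setdefault(row[1], []).append(row)
--
--     # Keys come out in sorted order; a traditional bucket is sorted locally
--     # (restriction of the global lexicographic sort to one key), while a
--     # simplified bucket already carries the original order, which is exactly
--     # what the stable key-sort would have produced.
--     tradDict = {k: [cedictListToDict(r) for r in sorted(tradBuckets[k])]
--                 for k in sorted(tradBuckets)}
--     simpDict = {k: [cedictListToDict(r) for r in simpBuckets[k]]
--                 for k in sorted(simpBuckets)}
--     return {"traditionalDict": tradDict, "simplifiedDict": simpDict}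
-- ===== Notes on version B (the rewrite author's own statement) =====
-- stated objective: alternative
-- what changed: Instead of A's two global sorts of all rows followed by itertools.groupby and dict.update merging of singleton dicts, B buckets the unsorted rows by both keys in one pass, then emits keys in sorted order, sorting only each traditional bucket locally and relying on sort stability to leave simplified buckets in original row order unsorted.
import Mathlib
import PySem

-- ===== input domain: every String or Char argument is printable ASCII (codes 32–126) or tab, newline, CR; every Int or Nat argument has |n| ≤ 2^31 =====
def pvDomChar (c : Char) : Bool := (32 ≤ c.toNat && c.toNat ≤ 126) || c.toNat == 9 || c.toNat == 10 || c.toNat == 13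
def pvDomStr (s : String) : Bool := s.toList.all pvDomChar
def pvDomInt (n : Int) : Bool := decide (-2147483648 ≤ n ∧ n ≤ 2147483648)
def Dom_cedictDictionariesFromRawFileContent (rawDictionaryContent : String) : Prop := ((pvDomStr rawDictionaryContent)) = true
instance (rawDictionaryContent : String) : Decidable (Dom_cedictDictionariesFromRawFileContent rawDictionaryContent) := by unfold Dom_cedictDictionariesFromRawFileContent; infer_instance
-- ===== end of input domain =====

-- B replaces A's two global row sorts + itertools.groupby + dict.update merging by ONE bucketing
-- pass over the unsorted rows, then sorted keys with per-bucket local sorting (none at all on the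
-- simplified side, by stability of Python's sort): objective 'alternative'.
-- Equivalence of the RETURN value; neither version mutates its argument.

-- ===== PORT A =====
-- shared same-module helpers (used verbatim by both Python versions)

-- Python dict literal {"traditional": x[0], …} as an insertion-ordered association list;
-- rows always have length 4, so the pyGetD defaults are never read on parsed rows.
def cedictListToDict (x : List String) : List (String × String) :=
  [("traditional", PySem.List.pyGetD x 0 ""),
   ("simplified", PySem.List.pyGetD x 1 ""),
   ("pinyin", PySem.List.pyGetD x 2 ""),
   ("meaning", PySem.List.pyGetD x 3 "")]

def getCedictSublistsToDict (group : List (List String)) : List (List (String × String)) :=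
  group.map cedictListToDict

def removeCommentLinesFromCedict (filelines : List String) : List String :=
  filelines.filter (fun x => !(PySem.Str.startswith x "# " || PySem.Str.startswith x "#!"))

-- x[0].upper() + x[1:] on a token of str.split(); split() tokens are nonempty, so the [] case
-- (where Python's x[0] would raise) is unreachable; upperChar is exact str.upper on one ASCII char.
def createDisplayPinyinString (rawPinyin : String) : String :=
  let pinyinList := PySem.Str.split₀ rawPinyin
  let capitalize := pinyinList.map (fun x =>
    match x.toList with
    | [] => ""
    | c :: rest => String.ofList (PySem.Chars.upperChar c :: rest))
  PySem.Str.join "" capitalize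

-- lineToList; 'none' exactly where Python raises IndexError ([1] on a 1-element split result);
-- splitMax? is none only for an empty separator, which never happens here.
def lineToList? (stringLine : String) : Option (List String) :=
  match PySem.Str.splitMax? stringLine " " 1 with
  | none => none
  | some firstSplit =>
    match PySem.List.pyGet? firstSplit 1 with
    | none => none
    | some fs1 =>
      match PySem.Str.splitMax? fs1 "[" 1 with
      | none => none
      | some secondSplit =>
        match PySem.List.pyGet? secondSplit 1 with
        | none => none
        | some ss1 =>
          match PySem.Str.splitMax? ss1 "]" 1 with
          | none => none
          | some thirdSplit =>
            match PySem.List.pyGet? thirdSplit 1 with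
            | none => none
            | some ts1 =>
              let traditional := PySem.List.pyGetD firstSplit 0 ""
              let simplified := PySem.Str.strip (PySem.List.pyGetD secondSplit 0 "")
              let rawPinyin := PySem.List.pyGetD thirdSplit 0 ""
              let meaning := PySem.Str.strip ts1
              let betterPinyin := createDisplayPinyinString rawPinyin
              some [traditional, simplified, betterPinyin, meaning]

-- itertools.groupby on a materialized list: maximal runs of adjacent equal keys, in order (exact port)
def cedictGroupby (key : List String → String) : List (List String) → List (String × List (List String))
  | [] => []
  | x :: xs =>
    (key x, x :: xs.takeWhile (fun y => key y == key x)) ::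
      cedictGroupby key (xs.dropWhile (fun y => key y == key x))
termination_by l => l.length
decreasing_by
  simp only [List.length_cons]
  exact Nat.lt_succ_of_le (List.length_dropWhile_le _ _)

-- sort keys are taken through String.toList: String's order IS the lexicographic order of its
-- character list (Python-exact on the ASCII domain), stated in kernel-reducible form
def cedictDictionariesFromRawFileContent (rawDictionaryContent : String) : List (String × List (String × List (List (String × String)))) :=
  let filelines := (PySem.Str.split? rawDictionaryContent "\n").getD []   -- sep "\n" ≠ "": never none
  let withoutComments := removeCommentLinesFromCedict filelines
  match withoutComments.mapM lineToList? with
  | none => []    -- some line fails to parse: Python raises IndexError here (excluded by Pre_)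
  | some res =>
    let listOfTrad := res.map (fun x => PySem.List.pyGetD x 0 "")
    let _tradset := PySem.Set.ofList listOfTrad
    let listOfSimp := res.map (fun x => PySem.List.pyGetD x 1 "")
    let _simpset := PySem.Set.ofList listOfSimp
    let sortByFirst := PySem.List.sorted res (fun x => x.map String.toList)
    let sortBySEcond := PySem.List.sorted res (fun x => (PySem.List.pyGetD x 1 "").toList)
    let tradIter := cedictGroupby (fun x => PySem.List.pyGetD x 0 "") sortByFirst
    let tradDictList := tradIter.map (fun kg => PySem.Dict.mk [(kg.1, getCedictSublistsToDict kg.2)])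
    let tradSuperDict := tradDictList.foldl (fun d sd => d.update sd.items) PySem.Dict.empty
    let simpIter := cedictGroupby (fun x => PySem.List.pyGetD x 1 "") sortBySEcond
    let simpDictList := simpIter.map (fun kg => PySem.Dict.mk [(kg.1, getCedictSublistsToDict kg.2)])
    let simpSuperDict := simpDictList.foldl (fun d sd => d.update sd.items) PySem.Dict.empty
    [("traditionalDict", tradSuperDict.items), ("simplifiedDict", simpSuperDict.items)]

-- ===== PORT B =====
-- Source B: one bucketing pass over the unsorted rows (a pair of dicts), then dict comprehensions
-- over the sorted key lists; only a traditional bucket is sorted, a simplified bucket is emitted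
-- in original row order.
def cedictDictionariesFromRawFileContent_alt (rawDictionaryContent : String) : List (String × List (String × List (List (String × String)))) :=
  let rows? := (((PySem.Str.split? rawDictionaryContent "\n").getD []).filter
      (fun line => !(PySem.Str.startswith line "# " || PySem.Str.startswith line "#!"))).mapM lineToList?
  match rows? with
  | none => []    -- a line fails to parse: Python raises IndexError (excluded by Pre_)
  | some rows =>
    let buckets := rows.foldl (fun bs row =>
        (bs.1.modify (PySem.List.pyGetD row 0 "") [] (· ++ [row]),
         bs.2.modify (PySem.List.pyGetD row 1 "") [] (· ++ [row])))
      (PySem.Dict.empty, PySem.Dict.empty)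
    let tradBuckets := buckets.1
    let simpBuckets := buckets.2
    let tradDict := (PySem.List.sorted tradBuckets.keys (fun k => k)).map
      (fun k => (k, (PySem.List.sorted (tradBuckets.getD k []) (fun x => x.map String.toList)).map cedictListToDict))
    let simpDict := (PySem.List.sorted simpBuckets.keys (fun k => k)).map
      (fun k => (k, (simpBuckets.getD k []).map cedictListToDict))
    [("traditionalDict", tradDict), ("simplifiedDict", simpDict)]

-- ===== PRECONDITION & SPEC =====
-- Pre_ excludes exactly the inputs on which A raises IndexError in lineToList: a non-comment line
-- that lacks a space, or a '[' after the first space, or a ']' after that '['.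
def pvLineOk (s : String) : Bool :=
  if PySem.Str.startswith s "# " || PySem.Str.startswith s "#!" then true
  else if !(PySem.Str.isIn " " s) then false
  else
    let rest1 := PySem.Str.slice s (some (PySem.Str.find s " " + 1)) none
    if !(PySem.Str.isIn "[" rest1) then false
    else
      let rest2 := PySem.Str.slice rest1 (some (PySem.Str.find rest1 "[" + 1)) none
      PySem.Str.isIn "]" rest2

def Pre_cedictDictionariesFromRawFileContent (rawDictionaryContent : String) : Prop :=
  (((PySem.Str.split? rawDictionaryContent "\n").getD []).all pvLineOk) = true
instance (rawDictionaryContent : String) : Decidable (Pre_cedictDictionariesFromRawFileContent rawDictionaryContent) := by unfold Pre_cedictDictionariesFromRawFileContent; infer_instance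

def pvWitness_cedictDictionariesFromRawFileContent : String :=
  "# CC-CEDICT sample\nAB ab [ni3 hao3] /hello/\nCD cd [ke3] /test/"

-- explicit decidable equality for the output type (instance search fails to assemble the nested product)
def pvDecEqOut : DecidableEq (List (String × List (String × List (List (String × String))))) :=
  @instDecidableEqList _ (fun x y => @instDecidableEqProd _ _ _ _ x y)

def Spec_cedictDictionariesFromRawFileContent (rawDictionaryContent : String) (out : List (String × List (String × List (List (String × String))))) : Prop := out = cedictDictionariesFromRawFileContent_alt rawDictionaryContent
instance (rawDictionaryContent : String) (out : List (String × List (String × List (List (String × String))))) : Decidable (Spec_cedictDictionariesFromRawFileContent rawDictionaryContent out) := by unfold Spec_cedictDictionariesFromRawFileContent; exact pvDecEqOut _ _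

-- ===== CLAIM (what is proved, stated in full; the proofs are below) =====
def Claim_equal_cedictDictionariesFromRawFileContent : Prop := ∀ (rawDictionaryContent : String), Dom_cedictDictionariesFromRawFileContent rawDictionaryContent → Pre_cedictDictionariesFromRawFileContent rawDictionaryContent → Spec_cedictDictionariesFromRawFileContent rawDictionaryContent (cedictDictionariesFromRawFileContent rawDictionaryContent)

-- ===== LEMMAS AND PROOFS =====

-- heads of lexicographically ordered rows are ordered (as Strings)
-- [] is the bottom of the lexicographic order on char lists
theorem pv_nil_le (cs : List Char) : ([] : List Char) ≤ cs := by
  cases cs with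
  | nil => exact le_refl _
  | cons c cs => exact le_of_lt (List.Lex.nil)

-- heads of lexicographically ordered rows are ordered (as Strings)
theorem pv_head_le (a b : List String)
    (h : a.map String.toList ≤ b.map String.toList) :
    PySem.List.pyGetD a 0 "" ≤ PySem.List.pyGetD b 0 "" := by
  rw [PySem.List.pyGetD_zero, PySem.List.pyGetD_zero, String.le_iff_toList_le]
  rcases le_iff_lt_or_eq.mp h with hlt | heq
  · cases a with
    | nil =>
      cases b with
      | nil => exact le_refl _
      | cons b0 bs => exact pv_nil_le _
    | cons a0 as =>
      cases b with
      | nil => cases hlt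
      | cons b0 bs =>
        simp only [List.map_cons] at hlt
        simpa using List.head_le_of_lt hlt
  · rw [List.map_injective_iff.mpr (fun s t hst => String.toList_injective hst) heq]

-- the head of a nonempty dropWhile fails the predicate
theorem pv_dropWhile_head_false {α : Type} (p : α → Bool) (l : List α) (h : α) (t : List α)
    (hdw : l.dropWhile p = h :: t) : p h = false := by
  have hw : l.dropWhile p ≠ [] := by simp [hdw]
  have hhead := List.head_dropWhile_not p hw
  rwa [show (l.dropWhile p).head hw = h from by simp [hdw]] at hhead

-- every element of the dropWhile suffix has a key different from the head's key
theorem pv_dropWhile_key_ne (key : List String → String) (x : List String) (xs : List (List String))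
    (hp : (x :: xs).Pairwise (fun a b => key a ≤ key b)) :
    ∀ y ∈ xs.dropWhile (fun y => key y == key x), key y ≠ key x := by
  obtain ⟨hx, hxs⟩ := List.pairwise_cons.mp hp
  intro y hy
  cases hdw : xs.dropWhile (fun y => key y == key x) with
  | nil => rw [hdw] at hy; cases hy
  | cons h t =>
    have hhf : (key h == key x) = false :=
      pv_dropWhile_head_false (fun y => key y == key x) xs h t hdw
    have hhne : key h ≠ key x := by simpa using hhf
    have hsub : (h :: t).Sublist xs := hdw ▸ List.dropWhile_sublist _
    rw [hdw] at hy
    rcases List.mem_cons.mp hy with rfl | hyt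
    · exact hhne
    · intro hyx
      have hpht := List.pairwise_cons.mp (hxs.sublist hsub)
      have hhy : key h ≤ key y := hpht.1 y hyt
      have hxh : key x ≤ key h := hx h (hsub.mem (List.mem_cons_self))
      exact hhne (le_antisymm (hyx ▸ hhy) hxh)

-- groupby of a key-sorted list, written as a map over any strictly increasing key enumeration
theorem pv_groupby_eq (key : List String → String) :
    ∀ (n : Nat) (S : List (List String)), S.length ≤ n →
    S.Pairwise (fun a b => key a ≤ key b) →
    ∀ ks : List String, ks.Pairwise (· < ·) →
    (∀ k, k ∈ ks ↔ ∃ r ∈ S, key r = k) →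
    cedictGroupby key S = ks.map (fun k => (k, S.filter (fun r => key r == k))) := by
  intro n
  induction n with
  | zero =>
    intro S hl _ ks _ hmem
    have hS : S = [] := List.length_eq_zero_iff.mp (Nat.le_zero.mp hl)
    subst hS
    cases ks with
    | nil => rw [cedictGroupby]; rfl
    | cons k0 ks' =>
      obtain ⟨r, hr, _⟩ := (hmem k0).mp List.mem_cons_self
      cases hr
  | succ n ih =>
    intro S hl hp ks hksp hmem
    cases S with
    | nil =>
      cases ks with
      | nil => rw [cedictGroupby]; rfl
      | cons k0 ks' =>
        obtain ⟨r, hr, _⟩ := (hmem k0).mp List.mem_cons_self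
        cases hr
    | cons x xs =>
      have hxmin : ∀ y ∈ x :: xs, key x ≤ key y := by
        intro y hy
        rcases List.mem_cons.mp hy with rfl | hy'
        · exact le_refl _
        · exact (List.pairwise_cons.mp hp).1 y hy'
      have hgkey : ∀ y ∈ xs.takeWhile (fun y => key y == key x), key y = key x := by
        intro y hy; simpa using List.mem_takeWhile_imp hy
      have hrest_ne := pv_dropWhile_key_ne key x xs hp
      -- ks must start with key x
      have hkx : key x ∈ ks := (hmem _).mpr ⟨x, List.mem_cons_self, rfl⟩
      cases ks with
      | nil => cases hkx
      | cons k0 ks' =>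
        have hk0le : key x ≤ k0 := by
          obtain ⟨r, hr, hkr⟩ := (hmem k0).mp List.mem_cons_self
          exact hkr ▸ hxmin r hr
        have hk0 : k0 = key x := by
          rcases List.mem_cons.mp hkx with heq | hmem'
          · exact heq.symm
          · exact absurd (lt_of_lt_of_le ((List.pairwise_cons.mp hksp).1 _ hmem') hk0le)
              (lt_irrefl _)
        subst hk0
        rw [cedictGroupby]
        have hxsplit : xs.takeWhile (fun y => key y == key x) ++
            xs.dropWhile (fun y => key y == key x) = xs := List.takeWhile_append_dropWhile
        have hfilterx : (x :: xs).filter (fun r => key r == key x)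
            = x :: xs.takeWhile (fun y => key y == key x) := by
          rw [List.filter_cons]
          simp only [beq_self_eq_true, if_pos]
          congr 1
          conv_lhs => rw [← hxsplit]
          rw [List.filter_append,
            List.filter_eq_self.mpr (fun a ha => by simp [hgkey a ha]),
            List.filter_eq_nil_iff.mpr (fun a ha => by simp [hrest_ne a ha]),
            List.append_nil]
        have hrest_pairwise : (xs.dropWhile (fun y => key y == key x)).Pairwise
            (fun a b => key a ≤ key b) :=
          (List.pairwise_cons.mp hp).2.sublist (List.dropWhile_sublist _)
        have hlen : (xs.dropWhile (fun y => key y == key x)).length ≤ n :=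
          le_trans (List.length_dropWhile_le _ _) (Nat.le_of_succ_le_succ hl)
        have hks' : ks'.Pairwise (· < ·) := (List.pairwise_cons.mp hksp).2
        have hmem' : ∀ k, k ∈ ks' ↔ ∃ r ∈ xs.dropWhile (fun y => key y == key x), key r = k := by
          intro k
          constructor
          · intro hk
            have hkne : k ≠ key x := ne_of_gt ((List.pairwise_cons.mp hksp).1 k hk)
            obtain ⟨r, hr, hkr⟩ := (hmem k).mp (List.mem_cons_of_mem _ hk)
            rcases List.mem_cons.mp hr with rfl | hrxs
            · exact absurd hkr.symm hkne
            · rw [← hxsplit] at hrxs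
              rcases List.mem_append.mp hrxs with hrg | hrrest
              · exact absurd ((hgkey r hrg).symm.trans hkr).symm hkne
              · exact ⟨r, hrrest, hkr⟩
          · intro ⟨r, hr, hkr⟩
            have hrS : r ∈ x :: xs :=
              List.mem_cons_of_mem _ ((List.dropWhile_sublist _).mem hr)
            have : key r ∈ key x :: ks' := (hmem _).mpr ⟨r, hrS, rfl⟩
            rcases List.mem_cons.mp this with heq | hmem''
            · exact absurd heq (hrest_ne r hr)
            · exact hkr ▸ hmem''
        rw [ih _ hlen hrest_pairwise ks' hks' hmem', List.map_cons]
        congr 1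
        · rw [hfilterx]
        · apply List.map_congr_left
          intro k hk
          have hkne : key x ≠ k := ne_of_lt ((List.pairwise_cons.mp hksp).1 k hk)
          have hfilterk : (x :: xs).filter (fun r => key r == k)
              = (xs.dropWhile (fun y => key y == key x)).filter (fun r => key r == k) := by
            rw [List.filter_cons, if_neg (by simp [hkne])]
            conv_lhs => rw [← hxsplit]
            rw [List.filter_append,
              List.filter_eq_nil_iff.mpr (fun a ha => by rw [hgkey a ha]; simp [hkne]),
              List.nil_append]
          rw [hfilterk]

-- insert before everything: if x goes before every element, insertBy prepends
theorem pv_insertBy_of_forall_before {α : Type} (before : α → α → Bool) (x : α) (L : List α)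
    (h : ∀ z ∈ L, before x z = true) :
    PySem.List.insertBy before x L = x :: L := by
  cases L with
  | nil => rfl
  | cons z zs => simp [PySem.List.insertBy, h z List.mem_cons_self]

-- filtering through one stable insertion step
theorem pv_filter_insertBy {α κ : Type} [LinearOrder κ] (key : α → κ) (p : α → Bool) (x : α) :
    ∀ L : List α, L.Pairwise (fun a b => key a ≤ key b) →
    (PySem.List.insertBy (fun a b => decide (key a < key b)) x L).filter p
      = if p x then PySem.List.insertBy (fun a b => decide (key a < key b)) x (L.filter p)
        else L.filter p := by
  intro L
  induction L with
  | nil =>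
    intro _
    by_cases hpx : p x <;> simp [PySem.List.insertBy, hpx]
  | cons y ys ih =>
    intro hp
    have hpys : ys.Pairwise (fun a b => key a ≤ key b) := (List.pairwise_cons.mp hp).2
    by_cases hxy : key x < key y
    · rw [show PySem.List.insertBy (fun a b => decide (key a < key b)) x (y :: ys)
          = x :: y :: ys from by simp [PySem.List.insertBy, hxy]]
      rw [List.filter_cons]
      by_cases hpx : p x
      · simp only [hpx, if_pos]
        rw [pv_insertBy_of_forall_before]
        intro z hz
        have hzmem : z ∈ y :: ys := List.mem_of_mem_filter hz
        have hyz : key y ≤ key z := by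
          rcases List.mem_cons.mp hzmem with rfl | hz'
          · exact le_refl _
          · exact (List.pairwise_cons.mp hp).1 z hz'
        simp [lt_of_lt_of_le hxy hyz]
      · simp [hpx]
    · rw [show PySem.List.insertBy (fun a b => decide (key a < key b)) x (y :: ys)
          = y :: PySem.List.insertBy (fun a b => decide (key a < key b)) x ys from by
            simp [PySem.List.insertBy, hxy]]
      rw [List.filter_cons, ih hpys, List.filter_cons]
      by_cases hpx : p x <;> by_cases hpy : p y <;>
        simp [hpx, hpy, PySem.List.insertBy, hxy]

-- a stable sort commutes with filtering by ANY predicate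
theorem pv_filter_sorted {α κ : Type} [LinearOrder κ] (key : α → κ) (p : α → Bool) (l : List α) :
    (PySem.List.sorted l key).filter p = PySem.List.sorted (l.filter p) key := by
  induction l using List.reverseRecOn with
  | nil => simp [PySem.List.sorted_eq_foldl_insertBy]
  | append_singleton l x ih =>
    rw [PySem.List.sorted_eq_foldl_insertBy (l ++ [x]), List.foldl_append,
      ← PySem.List.sorted_eq_foldl_insertBy l]
    simp only [List.foldl_cons, List.foldl_nil]
    rw [pv_filter_insertBy key p x _ (PySem.List.sorted_pairwise l key), ih,
      List.filter_append, List.filter_cons, List.filter_nil]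
    by_cases hpx : p x
    · simp only [hpx, if_pos]
      rw [PySem.List.sorted_eq_foldl_insertBy (l.filter p ++ [x]), List.foldl_append,
        ← PySem.List.sorted_eq_foldl_insertBy (l.filter p)]
      simp
    · simp [hpx]

-- the bucket dict: lookups are filters of the row list …
theorem pv_bucket_getD (key : List String → String) (res : List (List String)) (k : String) :
    (res.foldl (fun d row => d.modify (key row) [] (· ++ [row])) PySem.Dict.empty).getD k []
      = res.filter (fun r => key r == k) := by
  rw [show res.foldl (fun d row => d.modify (key row) [] (· ++ [row])) PySem.Dict.empty
      = (res.map (fun r => (key r, r))).foldl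
          (fun d p => d.modify p.1 [] (· ++ [p.2])) PySem.Dict.empty from by
        rw [List.foldl_map]]
  rw [PySem.Dict.getD_foldl_modify_append, PySem.Dict.getD_empty]
  rw [List.filter_map, List.map_map]
  simp [Function.comp_def]

-- … and its keys are the distinct row keys in first-occurrence order
theorem pv_bucket_keys (key : List String → String) (res : List (List String)) :
    (res.foldl (fun d row => d.modify (key row) [] (· ++ [row])) PySem.Dict.empty).keys
      = PySem.Set.ofList (res.map key) := by
  rw [PySem.Dict.keys_foldl_modify_key res key [] (fun _ row ys => ys ++ [row]) PySem.Dict.empty,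
    PySem.Dict.keys_empty, PySem.Set.update_nil_left]

-- A's update fold over singleton dicts with fresh distinct keys just appends the pairs
theorem pv_foldA_items {V : Type} (ps : List (String × V)) :
    ∀ d : PySem.Dict String V, (∀ p ∈ ps, d.contains p.1 = false) → (ps.map (·.1)).Nodup →
    ((ps.map (fun p => PySem.Dict.mk [p])).foldl (fun d sd => d.update sd.items) d).items
      = d.items ++ ps := by
  induction ps with
  | nil => intro d _ _; simp
  | cons p ps' ih =>
    intro d hfresh hnd
    simp only [List.map_cons, List.foldl_cons]
    have hupd : d.update (PySem.Dict.mk [p]).items = d.insert p.1 p.2 := by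
      simp [PySem.Dict.update]
    rw [hupd]
    simp only [List.map_cons, List.nodup_cons] at hnd
    have hfresh' : ∀ q ∈ ps', (d.insert p.1 p.2).contains q.1 = false := by
      intro q hq
      rw [PySem.Dict.contains_insert]
      have h1 : (q.1 == p.1) = false := by
        simp only [beq_eq_false_iff_ne, ne_eq]
        intro hqp
        exact hnd.1 (hqp ▸ List.mem_map_of_mem hq)
      rw [h1, hfresh q (List.mem_cons_of_mem _ hq)]
      rfl
    rw [ih _ hfresh' hnd.2,
      PySem.Dict.items_insert_of_not_contains d _ (hfresh p List.mem_cons_self)]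
    simp

-- sorted is insensitive to which (propositionally equivalent) order instance it is given
theorem pv_sorted_congr {α κ : Type} (i1 i2 : LT κ) (d1 : @DecidableLT κ i1) (d2 : @DecidableLT κ i2)
    (h : ∀ a b : κ, @decide (@LT.lt κ i1 a b) (d1 a b) = @decide (@LT.lt κ i2 a b) (d2 a b))
    (xs : List α) (key : α → κ) :
    @PySem.List.sorted α κ i1 d1 xs key false = @PySem.List.sorted α κ i2 d2 xs key false := by
  rw [@PySem.List.sorted_eq_foldl_insertBy α κ i1 d1 xs key,
      @PySem.List.sorted_eq_foldl_insertBy α κ i2 d2 xs key]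
  have hfun : (fun a b : α => @decide (@LT.lt κ i1 (key a) (key b)) (d1 (key a) (key b)))
      = (fun a b : α => @decide (@LT.lt κ i2 (key a) (key b)) (d2 (key a) (key b))) :=
    funext fun a => funext fun b => h (key a) (key b)
  rw [hfun]

-- the sorted distinct-key list qualifies as the key enumeration of pv_groupby_eq
theorem pv_sortedKeys_props (key : List String → String) (res S : List (List String))
    (hperm : S.Perm res) :
    (PySem.List.sorted (PySem.Set.ofList (res.map key)) (fun k => k)).Pairwise (· < ·) ∧
    (∀ k, k ∈ PySem.List.sorted (PySem.Set.ofList (res.map key)) (fun k => k) ↔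
      ∃ r ∈ S, key r = k) := by
  constructor
  · have hnd : (PySem.List.sorted (PySem.Set.ofList (res.map key)) (fun k => k)).Nodup :=
      (PySem.List.sorted_perm _ _ _).nodup_iff.mpr (PySem.Set.nodup_ofList _)
    have hle := PySem.List.sorted_pairwise (PySem.Set.ofList (res.map key)) (fun k => k)
    have := List.Pairwise.and hle hnd
    exact this.imp (fun ⟨h1, h2⟩ => lt_of_le_of_ne h1 h2)
  · intro k
    rw [PySem.List.mem_sorted, PySem.Set.mem_ofList]
    constructor
    · intro hk
      obtain ⟨r, hr, hkr⟩ := List.mem_map.mp hk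
      exact ⟨r, hperm.mem_iff.mpr hr, hkr⟩
    · intro ⟨r, hr, hkr⟩
      exact List.mem_map.mpr ⟨r, hperm.mem_iff.mp hr, hkr⟩

-- one side (trad or simp) of A's result, as a map over the sorted distinct keys
theorem pv_A_side (key : List String → String) (res S : List (List String))
    (hperm : S.Perm res) (hp : S.Pairwise (fun a b => key a ≤ key b)) :
    (((cedictGroupby key S).map
        (fun kg => PySem.Dict.mk [(kg.1, getCedictSublistsToDict kg.2)])).foldl
      (fun d sd => d.update sd.items) PySem.Dict.empty).items
    = (PySem.List.sorted (PySem.Set.ofList (res.map key)) (fun k => k)).map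
        (fun k => (k, (S.filter (fun r => key r == k)).map cedictListToDict)) := by
  obtain ⟨hks_lt, hks_mem⟩ := pv_sortedKeys_props key res S hperm
  rw [pv_groupby_eq key S.length S (le_refl _) hp _ hks_lt hks_mem]
  rw [show ((PySem.List.sorted (PySem.Set.ofList (res.map key)) (fun k => k)).map
        (fun k => (k, S.filter (fun r => key r == k)))).map
        (fun kg => PySem.Dict.mk [(kg.1, getCedictSublistsToDict kg.2)])
      = ((PySem.List.sorted (PySem.Set.ofList (res.map key)) (fun k => k)).map
          (fun k => (k, (S.filter (fun r => key r == k)).map cedictListToDict))).map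
          (fun p => PySem.Dict.mk [p]) from by
        rw [List.map_map, List.map_map]; rfl]
  rw [pv_foldA_items _ _ (fun p _ => PySem.Dict.contains_empty _) (by
    rw [List.map_map]
    simpa [Function.comp_def] using
      (PySem.List.sorted_perm (PySem.Set.ofList (res.map key)) (fun k => k) false).nodup_iff.mpr
        (PySem.Set.nodup_ofList _))]
  rfl

-- ambient-instance forms of the sort lemmas, via pv_sorted_congr
theorem pv_sorted_rows_congr (m : List (List String)) :
    PySem.List.sorted m (fun x => x.map String.toList)
      = @PySem.List.sorted _ _ _ LinearOrder.toDecidableLT m (fun x => x.map String.toList) false :=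
  pv_sorted_congr _ _ _ _ (fun a b => decide_eq_decide.mpr (List.lt_iff_lex_lt a b)) m _

theorem pv_sorted_chars_congr (m : List (List String)) :
    PySem.List.sorted m (fun x => (PySem.List.pyGetD x 1 "").toList)
      = @PySem.List.sorted _ _ _ LinearOrder.toDecidableLT m
          (fun x => (PySem.List.pyGetD x 1 "").toList) false :=
  pv_sorted_congr _ _ _ _ (fun a b => decide_eq_decide.mpr (List.lt_iff_lex_lt a b)) m _

theorem pv_filter_sorted_rows (p : List String → Bool) (l : List (List String)) :
    (PySem.List.sorted l (fun x => x.map String.toList)).filter p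
      = PySem.List.sorted (l.filter p) (fun x => x.map String.toList) := by
  rw [pv_sorted_rows_congr, pv_sorted_rows_congr, pv_filter_sorted]

theorem pv_filter_sorted_chars (p : List String → Bool) (l : List (List String)) :
    (PySem.List.sorted l (fun x => (PySem.List.pyGetD x 1 "").toList)).filter p
      = PySem.List.sorted (l.filter p) (fun x => (PySem.List.pyGetD x 1 "").toList) := by
  rw [pv_sorted_chars_congr, pv_sorted_chars_congr, pv_filter_sorted]

theorem pv_sorted_chars_eq_self (l : List (List String))
    (h : l.Pairwise (fun a b => (PySem.List.pyGetD a 1 "").toList ≤ (PySem.List.pyGetD b 1 "").toList)) :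
    PySem.List.sorted l (fun x => (PySem.List.pyGetD x 1 "").toList) = l := by
  rw [pv_sorted_chars_congr]
  exact PySem.List.sorted_eq_self_of_pairwise _ _ h

-- ===== VERDICT (by name: the statement is the Claim_ definition above) =====
theorem cedictDictionariesFromRawFileContent_spec : Claim_equal_cedictDictionariesFromRawFileContent := by
  intro raw _ _
  unfold Spec_cedictDictionariesFromRawFileContent
  simp only [cedictDictionariesFromRawFileContent, cedictDictionariesFromRawFileContent_alt,
    removeCommentLinesFromCedict]
  cases hm : ((((PySem.Str.split? raw "\n").getD []).filter
      (fun x => !(PySem.Str.startswith x "# " || PySem.Str.startswith x "#!"))).mapM lineToList?) with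
  | none => rfl
  | some res =>
    dsimp only
    have hbk := PySem.List.foldl_prod_mk
      (f := fun (d : PySem.Dict String (List (List String))) (row : List String) =>
        d.modify (PySem.List.pyGetD row 0 "") [] (· ++ [row]))
      (g := fun (d : PySem.Dict String (List (List String))) (row : List String) =>
        d.modify (PySem.List.pyGetD row 1 "") [] (· ++ [row]))
      res PySem.Dict.empty PySem.Dict.empty
    rw [hbk]
    dsimp only
    -- A's two sides in sorted-distinct-keys form
    have hperm1 : (PySem.List.sorted res (fun x => x.map String.toList)).Perm res :=
      PySem.List.sorted_perm _ _ _
    have hperm2 : (PySem.List.sorted res (fun x => (PySem.List.pyGetD x 1 "").toList)).Perm res :=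
      PySem.List.sorted_perm _ _ _
    have hp1 : (PySem.List.sorted res (fun x => x.map String.toList)).Pairwise
        (fun a b => PySem.List.pyGetD a 0 "" ≤ PySem.List.pyGetD b 0 "") := by
      rw [pv_sorted_rows_congr]
      exact (PySem.List.sorted_pairwise res (fun x => x.map String.toList)).imp
        (fun hab => pv_head_le _ _ hab)
    have hp2 : (PySem.List.sorted res (fun x => (PySem.List.pyGetD x 1 "").toList)).Pairwise
        (fun a b => PySem.List.pyGetD a 1 "" ≤ PySem.List.pyGetD b 1 "") := by
      rw [pv_sorted_chars_congr]
      exact (PySem.List.sorted_pairwise res (fun x => (PySem.List.pyGetD x 1 "").toList)).imp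
        (fun hab => String.le_iff_toList_le.mpr hab)
    rw [pv_A_side (fun x => PySem.List.pyGetD x 0 "") res _ hperm1 hp1,
      pv_A_side (fun x => PySem.List.pyGetD x 1 "") res _ hperm2 hp2]
    -- B's two sides: bucket keys are the distinct keys, bucket lookups are filters
    rw [pv_bucket_keys (fun row => PySem.List.pyGetD row 0 "") res,
      pv_bucket_keys (fun row => PySem.List.pyGetD row 1 "") res]
    refine congrArg₂
      (fun (x y : List (String × List (List (String × String)))) =>
        [("traditionalDict", x), ("simplifiedDict", y)]) ?_ ?_
    -- traditional side
    · apply List.map_congr_left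
      intro k _
      rw [pv_bucket_getD (fun row => PySem.List.pyGetD row 0 "") res k,
        ← pv_filter_sorted_rows (fun r => PySem.List.pyGetD r 0 "" == k) res]
    -- simplified side
    · apply List.map_congr_left
      intro k _
      rw [pv_bucket_getD (fun row => PySem.List.pyGetD row 1 "") res k]
      have hconst : (res.filter (fun r => PySem.List.pyGetD r 1 "" == k)).Pairwise
          (fun a b => (PySem.List.pyGetD a 1 "").toList ≤ (PySem.List.pyGetD b 1 "").toList) := by
        apply List.pairwise_of_forall_mem_list
        intro a ha b hb
        have hak : PySem.List.pyGetD a 1 "" = k := by simpa using (List.mem_filter.mp ha).2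
        have hbk : PySem.List.pyGetD b 1 "" = k := by simpa using (List.mem_filter.mp hb).2
        rw [hak, hbk]
      rw [← pv_sorted_chars_eq_self _ hconst,
        ← pv_filter_sorted_chars (fun r => PySem.List.pyGetD r 1 "" == k) res]
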